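-- pv_equiv track=rewrite | github.com/Yundi-Zhang/CrackingtheCodeInterviewPractice | chapter01/myp06_string_compression.py | update_str_compre
-- ===== SOURCE A (Python) =====
-- def update_str_compre(string: str) -> str:
--     counter = 0
--     cps_lst = []
--
--     for i in range(len(string)):
--         if i != 0 and string[i-1] != string[i]:
--             cps_lst.append(string[i-1] + str(counter))
--             counter = 0
--         counter += 1
--
--     if counter:
--         cps_lst.append(string[-1] + str(counter))
--
--     return min(string, "".join(cps_lst), key=len)
-- ===== SOURCE B (Python) =====
-- def update_str_compre(string: str) -> str:
--     # Staged decomposition: pass 1 collects every run-boundary index; pass 2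
--     # pairs adjacent boundaries and emits char + run length. No counter state,
--     # no previous-char comparison inside an emitting loop, no end-of-loop flush.
--     n = len(string)
--     cuts = [i for i in range(n + 1)
--             if i == 0 or i == n or string[i] != string[i - 1]]
--     compressed = "".join(string[a] + str(b - a) for a, b in zip(cuts, cuts[1:]))
--     return min(string, compressed, key=len)
-- ===== Notes on version B (the rewrite author's own statement) =====
-- stated objective: alternative
-- what changed: Replaces A's single emitting loop with carried counter/previous-char state and post-loop flush by two staged passes: first collect all run-boundary indices, then zip adjacent boundaries and emit char + (b - a) per pair.
import Mathlib
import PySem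

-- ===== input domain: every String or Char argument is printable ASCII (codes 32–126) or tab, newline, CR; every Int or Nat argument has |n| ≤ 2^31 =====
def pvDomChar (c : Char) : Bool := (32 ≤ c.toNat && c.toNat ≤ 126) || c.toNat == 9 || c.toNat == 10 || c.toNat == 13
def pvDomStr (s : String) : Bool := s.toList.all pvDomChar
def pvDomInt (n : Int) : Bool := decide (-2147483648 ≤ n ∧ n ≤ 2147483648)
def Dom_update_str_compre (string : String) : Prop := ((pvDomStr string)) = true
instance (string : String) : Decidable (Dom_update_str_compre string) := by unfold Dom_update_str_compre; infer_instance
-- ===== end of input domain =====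

-- B replaces A's emitting loop (carried counter/previous-char state + post-loop
-- flush) by two staged passes: collect all run-boundary indices, then emit
-- char+length per adjacent boundary pair; same return value.

-- ===== PORT A =====
-- string[i] for an index A always keeps in range (getD is never hit on A's accesses)
def charAt (s : List Char) (i : Int) : Char := (PySem.List.pyGet? s i).getD ' '

-- the body of A's 'for i in range(len(string))' loop; state = (counter, cps_lst)
def bodyA (s : List Char) (st : Int × List (List Char)) (i : Int) : Int × List (List Char) :=
  if i ≠ 0 ∧ charAt s (i - 1) ≠ charAt s i then
    (0 + 1, st.2 ++ [charAt s (i - 1) :: PySem.Int.toChars st.1])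
  else (st.1 + 1, st.2)

def update_str_compre (string : String) : String :=
  let s := string.toList
  let st := (PySem.List.pyRange 0 (PySem.List.len s) 1).foldl (bodyA s) (0, [])
  let cps := if st.1 ≠ 0 then st.2 ++ [charAt s (-1) :: PySem.Int.toChars st.1] else st.2
  let compressed := PySem.Chars.join [] cps
  -- min(string, compressed, key=len): first argument wins ties
  if PySem.Chars.len compressed < PySem.Chars.len s then String.ofList compressed else string

-- ===== PORT B =====
-- the comprehension's condition 'i == 0 or i == n or string[i] != string[i-1]';
-- the indexings are only decisive for 0 < i < n, where both are in range, so getD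
-- is exact there (Python's short-circuit 'or' never indexes out of range)
def predB (s : List Char) (i : Nat) : Bool :=
  i == 0 || i == s.length || !(s.getD i ' ' == s.getD (i - 1) ' ')

-- pass 1: 'cuts = [i for i in range(n + 1) if ...]'
def cutsB (s : List Char) : List Nat := (List.range (s.length + 1)).filter (predB s)

-- 'string[a] + str(b - a)' for one adjacent boundary pair (a, b)
def segB (s : List Char) (p : Nat × Nat) : List Char :=
  s.getD p.1 ' ' :: PySem.Int.toChars ((p.2 : Int) - (p.1 : Int))

def update_str_compre_alt (string : String) : String :=
  let s := string.toList
  let cuts := cutsB s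
  -- pass 2: '"".join(string[a] + str(b - a) for a, b in zip(cuts, cuts[1:]))'
  let compressed := PySem.Chars.join [] ((cuts.zip cuts.tail).map (segB s))
  if PySem.Chars.len compressed < PySem.Chars.len s then String.ofList compressed else string

-- ===== PRECONDITION & SPEC =====
def Spec_update_str_compre (string : String) (out : String) : Prop := out = update_str_compre_alt string
instance (string : String) (out : String) : Decidable (Spec_update_str_compre string out) := by unfold Spec_update_str_compre; infer_instance

-- ===== CLAIM (what is proved, stated in full; the proofs are below) =====
def Claim_equal_update_str_compre : Prop := ∀ (string : String), Dom_update_str_compre string → Spec_update_str_compre string (update_str_compre string)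

-- ===== LEMMAS AND PROOFS =====

-- A's loop rephrased structurally: remaining chars, previous char, counter, output
def loopA : List Char → Char → Int → List (List Char) → Int × List (List Char)
  | [], _, k, acc => (k, acc)
  | c :: cs, prev, k, acc =>
      if prev ≠ c then loopA cs c 1 (acc ++ [prev :: PySem.Int.toChars k])
      else loopA cs c (k + 1) acc

-- runs of (prev repeated, implicitly k times) ++ cs, with Int counts
def runs' : Char → Int → List Char → List (Char × Int)
  | prev, k, [] => [(prev, k)]
  | prev, k, c :: cs =>
      if prev ≠ c then (prev, k) :: runs' c 1 cs else runs' prev (k + 1) cs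

def seg (p : Char × Int) : List Char := p.1 :: PySem.Int.toChars p.2

-- the canonical run list (maximal runs with Int counts)
def runsI : List Char → List (Char × Int)
  | [] => []
  | c :: rest =>
      (c, 1 + ((rest.takeWhile (fun d => d == c)).length : Int)) ::
        runsI (rest.dropWhile (fun d => d == c))
termination_by cs => cs.length
decreasing_by
  simpa using Nat.lt_succ_of_le (List.length_dropWhile_le _ _)

lemma fold_aux (s : List Char) (m : Nat) : ∀ (j : Nat) (prev : Char) (k : Int)
    (acc : List (List Char)), j + m = s.length → 1 ≤ j → s[j-1]? = some prev →
    (PySem.List.pyRange (j : Int) (s.length : Int) 1).foldl (bodyA s) (k, acc)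
      = loopA (s.drop j) prev k acc := by
  induction m with
  | zero =>
    intro j prev k acc hlen hj hprev
    have hj' : j = s.length := by omega
    subst hj'
    rw [PySem.List.pyRange_one_eq_nil (le_refl _)]
    simp [loopA]
  | succ m ih =>
    intro j prev k acc hlen hj hprev
    have hjlt : j < s.length := by omega
    rw [PySem.List.pyRange_one_cons (by exact_mod_cast hjlt)]
    have hget : charAt s ((j : Int) - 1) = prev := by
      have : ((j : Int) - 1) = ((j - 1 : Nat) : Int) := by omega
      simp [charAt, this, PySem.List.pyGet?_natCast, hprev]
    have hgetj : charAt s (j : Int) = s[j] := by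
      simp [charAt, PySem.List.pyGet?_natCast, List.getElem?_eq_getElem hjlt]
    have hdrop : s.drop j = s[j] :: s.drop (j + 1) := List.drop_eq_getElem_cons hjlt
    have hcast : (j : Int) + 1 = ((j + 1 : Nat) : Int) := by omega
    rw [List.foldl_cons]
    by_cases hne : prev = s[j]
    · have hbody : bodyA s (k, acc) (j : Int) = (k + 1, acc) := by
        simp [bodyA, hget, hgetj, hne]
      rw [hbody, hcast, ih (j + 1) (s[j]) (k + 1) acc (by omega) (by omega)
        (by simpa using List.getElem?_eq_getElem hjlt), hdrop]
      simp [loopA, hne]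
    · have hbody : bodyA s (k, acc) (j : Int)
          = (0 + 1, acc ++ [prev :: PySem.Int.toChars k]) := by
        simp [bodyA, hget, hgetj, hne]
        omega
      rw [hbody, hcast, ih (j + 1) (s[j]) (0 + 1) (acc ++ [prev :: PySem.Int.toChars k])
        (by omega) (by omega) (by simpa using List.getElem?_eq_getElem hjlt), hdrop]
      simp [loopA, hne]

lemma loopA_pos (cs : List Char) : ∀ (prev : Char) (k : Int) (acc : List (List Char)),
    1 ≤ k → 1 ≤ (loopA cs prev k acc).1 := by
  induction cs with
  | nil => intro prev k acc hk; simpa [loopA] using hk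
  | cons c cs ih =>
    intro prev k acc hk
    by_cases h : prev = c
    · simpa [loopA, h] using ih c (k + 1) acc (by omega)
    · simpa [loopA, h] using ih c 1 _ (by omega)

lemma flush_eq (cs : List Char) : ∀ (prev : Char) (k : Int) (acc : List (List Char)),
    (loopA cs prev k acc).2 ++ [cs.getLastD prev :: PySem.Int.toChars (loopA cs prev k acc).1]
      = acc ++ (runs' prev k cs).map seg := by
  induction cs with
  | nil => intro prev k acc; simp [loopA, runs', seg]
  | cons c cs ih =>
    intro prev k acc
    by_cases h : prev = c
    · simp only [loopA, runs', h, ne_eq, not_true_eq_false, if_false,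
        List.getLastD_cons]
      simpa using ih c (k + 1) acc
    · simp only [loopA, runs', ne_eq, h, not_false_eq_true, if_true,
        List.getLastD_cons]
      rw [ih c 1 (acc ++ [prev :: PySem.Int.toChars k])]
      simp [seg]

lemma runs'_runsI (cs : List Char) : ∀ (prev : Char) (k : Nat),
    runs' prev (k : Int) cs
      = (prev, (k : Int) + ((cs.takeWhile (fun d => d == prev)).length : Int)) ::
          runsI (cs.dropWhile (fun d => d == prev)) := by
  induction cs with
  | nil => intro prev k; simp [runs', runsI]
  | cons c cs ih =>
    intro prev k
    by_cases h : prev = c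
    · subst h
      have : ((k : Int) + 1) = ((k + 1 : Nat) : Int) := by omega
      simp only [runs', ne_eq, not_true_eq_false, if_false, this,
        List.takeWhile_cons, List.dropWhile_cons, beq_self_eq_true, if_true]
      rw [ih prev (k + 1)]
      simp
      ring
    · have hbe : (c == prev) = false := by simp [beq_eq_false_iff_ne]; exact fun e => h e.symm
      simp only [runs', ne_eq, h, not_false_eq_true, if_true,
        List.takeWhile_cons, List.dropWhile_cons, hbe]
      have h1 := ih c 1
      simp only [Nat.cast_one] at h1
      rw [h1]
      simp [runsI]

lemma last_cons (c : Char) (cs : List Char) :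
    charAt (c :: cs) (-1) = cs.getLastD c := by
  simp [charAt, PySem.List.pyGet?_neg_one]
  induction cs generalizing c with
  | nil => simp
  | cons d ds ih => simpa [List.getLast?_cons, List.getLastD_cons] using ih d

lemma dropWhile_drop (p : Char → Bool) (l : List Char) :
    l.dropWhile p = l.drop (l.takeWhile p).length := by
  induction l with
  | nil => rfl
  | cons a l ih =>
    by_cases h : p a
    · simp [h, ih]
    · simp [h]

lemma getD_drop (s : List Char) (r a : Nat) :
    (s.drop r).getD a ' ' = s.getD (r + a) ' ' := by
  simp [List.getD_eq_getElem?_getD, List.getElem?_drop]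

lemma run_const (cs : List Char) : ∀ (c : Char) (i : Nat),
    i ≤ (cs.takeWhile (fun d => d == c)).length → (c :: cs).getD i ' ' = c := by
  induction cs with
  | nil =>
    intro c i hi
    simp only [List.takeWhile_nil, List.length_nil, Nat.le_zero] at hi
    subst hi; rfl
  | cons d ds ih =>
    intro c i hi
    match i with
    | 0 => rfl
    | j + 1 =>
      rw [List.takeWhile_cons] at hi
      by_cases hd : (d == c) = true
      · have hdc : d = c := by simpa using hd
        subst hdc
        simp only [beq_self_eq_true, if_true, List.length_cons] at hi
        have : (d :: ds).getD j ' ' = d := ih d j (by omega)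
        simpa using this
      · simp [hd] at hi

lemma cuts_head (s : List Char) : cutsB s = 0 :: (cutsB s).tail := by
  unfold cutsB
  rw [List.range_succ_eq_map, List.filter_cons]
  simp [predB]

lemma cuts_cons (c : Char) (cs : List Char) :
    cutsB (c :: cs)
      = 0 :: (cutsB ((c :: cs).drop (1 + (cs.takeWhile (fun d => d == c)).length))).map
          ((1 + (cs.takeWhile (fun d => d == c)).length) + ·) := by
  have htle : (cs.takeWhile (fun d => d == c)).length ≤ cs.length :=
    (List.takeWhile_sublist _).length_le
  set tl := (cs.takeWhile (fun d => d == c)).length with htl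
  set r := 1 + tl with hr
  set s := c :: cs with hs
  have hn : s.length = cs.length + 1 := by simp [hs]
  set m := cs.length + 1 - r with hm
  have hrm : s.length + 1 = r + (m + 1) := by omega
  have hsplit : List.range (s.length + 1)
      = List.range r ++ (List.range (m + 1)).map (r + ·) := by
    rw [hrm, List.range_add]
  have hdroplen : (s.drop r).length = m := by
    rw [List.length_drop, hn, hm]
  have hdw : s.drop r = cs.dropWhile (fun d => d == c) := by
    rw [hs, hr, Nat.add_comm 1 tl, List.drop_succ_cons,
      dropWhile_drop (fun d => d == c) cs, htl]
  -- (a) the first r indices contribute exactly [0]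
  have hfirst : (List.range r).filter (predB s) = [0] := by
    have hsp : List.range r = List.range 1 ++ (List.range tl).map (1 + ·) := by
      rw [hr, List.range_add]
    rw [hsp, List.filter_append]
    have h0 : (List.range 1).filter (predB s) = [0] := by
      simp [List.range_succ_eq_map, predB]
    rw [h0, List.filter_map, List.filter_eq_nil_iff.mpr, List.map_nil, List.append_nil]
    intro j hj
    simp only [List.mem_range] at hj
    have h1 : s.getD (1 + j) ' ' = c := run_const cs c (1 + j) (by omega)
    have h2 : s.getD (1 + j - 1) ' ' = c := run_const cs c (1 + j - 1) (by omega)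
    simp only [Function.comp_apply, predB, hn, h1, h2, beq_self_eq_true,
      Bool.not_true, Bool.or_false]
    simp only [Bool.or_eq_true, beq_iff_eq, not_or]
    constructor <;> omega
  -- (b) on index r + j the predicate coincides with s.drop r's predicate at j
  have hrest : ((List.range (m + 1)).map (r + ·)).filter (predB s)
      = ((List.range (m + 1)).filter (predB (s.drop r))).map (r + ·) := by
    rw [List.filter_map]
    congr 1
    apply List.filter_congr
    intro j hj
    simp only [List.mem_range] at hj
    simp only [Function.comp_apply, predB, hdroplen, hn]
    match j with
    | 0 =>
      simp only [Nat.add_zero, beq_self_eq_true, Bool.true_or]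
      by_cases hrn : r = cs.length + 1
      · simp [hrn]
      · have hmpos : 1 ≤ m := by omega
        have hlen0 : 0 < (cs.dropWhile (fun d => d == c)).length := by
          rw [← hdw]; omega
        have hne : (s.getD r ' ' == s.getD (r - 1) ' ') = false := by
          have hprev : s.getD (r - 1) ' ' = c := run_const cs c (r - 1) (by omega)
          have hnot := List.dropWhile_get_zero_not (p := fun d => d == c) cs hlen0
          have hcur : s.getD r ' ' = (cs.dropWhile (fun d => d == c)).get ⟨0, hlen0⟩ := by
            have e0 : s.getD r ' ' = (s.drop r).getD 0 ' ' := by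
              rw [getD_drop s r 0]; norm_num
            rw [e0, hdw, List.getD_eq_getElem _ _ hlen0]
            simp [List.get_eq_getElem]
          rw [hcur, hprev]
          simpa using hnot
        simp only [hne, Bool.not_false, Bool.or_true]
    | j + 1 =>
      have e1 : s.getD (r + (j + 1)) ' ' = (s.drop r).getD (j + 1) ' ' :=
        (getD_drop s r (j + 1)).symm
      have e2 : s.getD (r + (j + 1) - 1) ' ' = (s.drop r).getD (j + 1 - 1) ' ' := by
        have e : r + (j + 1) - 1 = r + j := by omega
        rw [e, ← getD_drop s r j]
        norm_num
      rw [e1, e2]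
      have e3 : (r + (j + 1) == 0) = (j + 1 == 0) := by
        simp
      have e4 : (r + (j + 1) == cs.length + 1) = (j + 1 == m) := by
        by_cases h1 : r + (j + 1) = cs.length + 1 <;> by_cases h2 : j + 1 = m <;>
          simp [h1, h2] <;> omega
      rw [e3, e4]
  unfold cutsB
  rw [hsplit, List.filter_append, hfirst, hrest, hdroplen]
  rfl

lemma pairs_seg (n : Nat) : ∀ (s : List Char), s.length ≤ n →
    ((cutsB s).zip (cutsB s).tail).map (segB s) = (runsI s).map seg := by
  induction n with
  | zero =>
    intro s hs
    have : s = [] := List.eq_nil_of_length_eq_zero (by omega)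
    subst this
    simp [cutsB, predB, runsI, List.range_succ]
  | succ n ih =>
    intro s hs
    match s with
    | [] => simp [cutsB, predB, runsI, List.range_succ]
    | c :: cs =>
      set t := cs.takeWhile (fun d => d == c) with ht
      set r := 1 + t.length with hr
      have hdw : (c :: cs).drop r = cs.dropWhile (fun d => d == c) := by
        rw [hr, Nat.add_comm 1 t.length, List.drop_succ_cons,
          dropWhile_drop (fun d => d == c) cs, ht]
      set s' := cs.dropWhile (fun d => d == c) with hs'
      have hlen' : s'.length ≤ n := by
        have h1 : s'.length ≤ cs.length := List.length_dropWhile_le _ _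
        simp only [List.length_cons] at hs
        omega
      have hcut : cutsB (c :: cs) = 0 :: (cutsB s').map (r + ·) := by
        rw [cuts_cons c cs, hdw]
      have hzip : ((cutsB (c :: cs)).zip (cutsB (c :: cs)).tail)
          = (0, r) :: (((cutsB s').zip (cutsB s').tail).map (Prod.map (r + ·) (r + ·))) := by
        rw [hcut]
        conv_lhs => rw [cuts_head s', List.tail_cons]
        simp only [List.map_cons, Nat.add_zero, List.zip_cons_cons]
        congr 1
        have hmapcons : (r :: ((cutsB s').tail).map (r + ·)) = (0 :: (cutsB s').tail).map (r + ·) := by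
          simp
        rw [hmapcons, List.zip_map, ← cuts_head s']
      have hsegsh : ∀ p : Nat × Nat, segB (c :: cs) (Prod.map (r + ·) (r + ·) p) = segB s' p := by
        intro p
        rcases p with ⟨a, b⟩
        simp only [Prod.map_apply]
        unfold segB
        rw [← getD_drop (c :: cs) r a, hdw]
        congr 2
        push_cast
        ring
      rw [hzip, List.map_cons, List.map_map]
      have hmap2 : ((cutsB s').zip (cutsB s').tail).map (segB (c :: cs) ∘ Prod.map (r + ·) (r + ·))
          = ((cutsB s').zip (cutsB s').tail).map (segB s') := by
        apply List.map_congr_left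
        intro p _
        exact hsegsh p
      rw [hmap2, ih s' hlen']
      have hrunsI : runsI (c :: cs) = (c, (r : Int)) :: runsI s' := by
        rw [runsI, ← ht, ← hs']
        congr 1
      rw [hrunsI, List.map_cons]
      congr 1

-- ===== VERDICT (by name: the statement is the Claim_ definition above) =====
theorem update_str_compre_spec : Claim_equal_update_str_compre := by
  intro string _
  unfold Spec_update_str_compre update_str_compre update_str_compre_alt
  cases hs : string.toList with
  | nil => rfl
  | cons c cs =>
    simp only [hs]
    have h0 : (PySem.List.pyRange 0 (PySem.List.len (c :: cs)) 1).foldl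
        (bodyA (c :: cs)) (0, []) = loopA cs c 1 [] := by
      have hlp : (0 : Int) < ((c :: cs).length : Int) := by
        have h01 : 0 < (c :: cs).length := by simp
        exact_mod_cast h01
      rw [PySem.List.len_eq, PySem.List.pyRange_one_cons hlp]
      rw [List.foldl_cons]
      have hb : bodyA (c :: cs) ((0 : Int), []) 0 = (1, []) := by simp [bodyA]
      rw [hb]
      have := fold_aux (c :: cs) cs.length 1 c 1 [] (by simp; omega) (by omega) (by simp)
      simpa using this
    rw [h0]
    have hpos : 1 ≤ (loopA cs c 1 []).1 := loopA_pos cs c 1 [] (by omega)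
    have hne : (loopA cs c 1 []).1 ≠ 0 := by omega
    simp only [hne, if_true, last_cons, ne_eq, not_false_eq_true]
    have hflush := flush_eq cs c 1 []
    simp only [List.nil_append] at hflush
    rw [hflush]
    have hruns : runs' c 1 cs = runsI (c :: cs) := by
      have := runs'_runsI cs c 1
      simp only [Nat.cast_one] at this
      rw [this, runsI]
    have hB := pairs_seg (c :: cs).length (c :: cs) (le_refl _)
    rw [hruns, ← hB]
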